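-- pv_equiv track=rewrite | github.com/emree-1/tools | powershell_deobfuscator/deobfuscator.py | first_clean
-- ===== SOURCE A (Python) =====
-- def first_clean(input):
--     """Prepare all lines before further analysis."""
--     res = []
--
--     lines = input.split("\n")
--     for line in lines :
--         y = line.strip().lower().split(";")
--         x = [z.strip() for z in y]
--         res += x
--     return res
-- ===== SOURCE B (Python) =====
-- def first_clean(input):
--     """Prepare all lines before further analysis."""
--     return [t.strip() for t in input.lower().replace(";", "\n").split("\n")]
-- ===== Notes on version B (the rewrite author's own statement) =====
-- stated objective: simpler
-- what changed: Replaces the line-by-line loop (strip each line, lowercase it, split it on semicolons, strip each piece, accumulate) with a single pass: lowercase the whole input once, fold semicolons into newlines with one replace call, split once, and strip each token; the per-line outer strip is redundant because every token is stripped anyway.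
import Mathlib
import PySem

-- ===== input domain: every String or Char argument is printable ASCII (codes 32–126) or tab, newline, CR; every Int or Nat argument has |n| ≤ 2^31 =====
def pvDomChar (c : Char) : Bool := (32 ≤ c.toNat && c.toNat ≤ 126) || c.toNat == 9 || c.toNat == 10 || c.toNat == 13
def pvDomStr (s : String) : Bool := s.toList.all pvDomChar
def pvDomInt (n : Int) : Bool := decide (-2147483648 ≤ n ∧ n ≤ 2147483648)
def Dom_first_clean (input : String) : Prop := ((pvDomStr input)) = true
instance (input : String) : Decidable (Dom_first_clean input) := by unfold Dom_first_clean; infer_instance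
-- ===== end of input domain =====

-- B replaces A's per-line loop (strip/lower/split ';'/strip each/accumulate) with one pass:
-- lowercase once, turn ';' into '\n' with a single replace, split once on '\n', strip each token (simpler).

-- ===== PORT A =====
-- A, line for line: split the input on "\n"; for each line, strip+lower it, split on ";",
-- strip each piece, and append to the accumulator.  (Python string ops ported at the
-- PySem.Chars level on input.toList, which is exact; tokens turned back into String.)
def first_clean (input : String) : List String :=
  (PySem.Chars.splitOn input.toList ['\n']).foldl
    (fun res line =>
      res ++ ((PySem.Chars.splitOn (PySem.Chars.lower (PySem.Chars.strip line)) [';']).map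
        (fun z => String.ofList (PySem.Chars.strip z))))
    []

-- ===== PORT B =====
-- B: input.lower().replace(";", "\n").split("\n"), then strip each token.
def first_clean_alt (input : String) : List String :=
  ((PySem.Chars.splitOn
      (PySem.Chars.replace (PySem.Chars.lower input.toList) [';'] ['\n']) ['\n']).map
    (fun t => String.ofList (PySem.Chars.strip t)))

-- ===== PRECONDITION & SPEC =====
def Spec_first_clean (input : String) (out : List String) : Prop := out = first_clean_alt input
instance (input : String) (out : List String) : Decidable (Spec_first_clean input out) := by unfold Spec_first_clean; infer_instance

-- ===== CLAIM (what is proved, stated in full; the proofs are below) =====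
def Claim_equal_first_clean : Prop := ∀ (input : String), Dom_first_clean input → Spec_first_clean input (first_clean input)

-- ===== LEMMAS AND PROOFS =====

-- Structural single-character split: (first piece, remaining pieces).
def splitP (c : Char) : List Char → (List Char × List (List Char))
  | [] => ([], [])
  | x :: xs =>
    if x = c then ([], (splitP c xs).1 :: (splitP c xs).2)
    else (x :: (splitP c xs).1, (splitP c xs).2)

-- Structural right strip.
def myR : List Char → List Char
  | [] => []
  | x :: xs => match myR xs with
    | [] => if PySem.Chars.isspace x then [] else [x]
    | r => x :: r

def modLast (f : List Char → List Char) : List (List Char) → List (List Char)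
  | [] => []
  | [a] => [f a]
  | a :: rest => a :: modLast f rest

theorem modLast_cons₂ (f : List Char → List Char) (a b : List Char) (r : List (List Char)) :
    modLast f (a :: b :: r) = a :: modLast f (b :: r) := rfl

theorem splitOn_go_single (c : Char) : ∀ (fuel : Nat) (l cur : List Char) (acc : List (List Char)),
    l.length ≤ fuel →
    PySem.Chars.splitOn.go [c] fuel l cur acc
      = acc.reverse ++ (cur.reverse ++ (splitP c l).1) :: (splitP c l).2 := by
  intro fuel
  induction fuel with
  | zero =>
    intro l cur acc h
    have hl : l = [] := by cases l <;> simp_all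
    subst hl
    simp [PySem.Chars.splitOn.go, splitP]
  | succ n ih =>
    intro l cur acc h
    cases l with
    | nil => simp [PySem.Chars.splitOn.go, splitP]
    | cons x rest =>
      by_cases hx : x = c
      · subst hx
        rw [PySem.Chars.splitOn.go]
        simp [List.isPrefixOf, ih rest [] _ (by simpa using h), splitP]
      · rw [PySem.Chars.splitOn.go]
        simp [List.isPrefixOf, Ne.symm hx, hx, ih rest (x :: cur) _ (by simpa using h), splitP]

theorem splitOn_single (l : List Char) (c : Char) :
    PySem.Chars.splitOn l [c] = (splitP c l).1 :: (splitP c l).2 := by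
  rw [PySem.Chars.splitOn, splitOn_go_single c _ _ _ _ (by omega)]
  simp

theorem replace_go_single (c d : Char) : ∀ (fuel : Nat) (l acc : List Char),
    l.length ≤ fuel →
    PySem.Chars.replace.go [c] [d] fuel l acc
      = acc.reverse ++ l.map (fun x => if x = c then d else x) := by
  intro fuel
  induction fuel with
  | zero =>
    intro l acc h
    have hl : l = [] := by cases l <;> simp_all
    subst hl
    simp [PySem.Chars.replace.go]
  | succ n ih =>
    intro l acc h
    cases l with
    | nil => simp [PySem.Chars.replace.go]
    | cons x rest =>
      by_cases hx : x = c
      · subst hx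
        rw [PySem.Chars.replace.go]
        simp [List.isPrefixOf, ih rest _ (by simpa using h)]
      · rw [PySem.Chars.replace.go]
        simp [List.isPrefixOf, Ne.symm hx, hx, ih rest _ (by simpa using h)]

theorem replace_single (l : List Char) (c d : Char) :
    PySem.Chars.replace l [c] [d] = l.map (fun x => if x = c then d else x) := by
  rw [PySem.Chars.replace]
  simp only [List.isEmpty_cons, Bool.false_eq_true, if_false]
  rw [replace_go_single c d l.length l [] (le_refl _)]
  simp

theorem toNat_ofNat' (n : Nat) (h : n < 55296) : (Char.ofNat n).toNat = n := by
  rw [Char.toNat_ofNat]; simp [Nat.isValidChar]; omega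

theorem isupper_iff (c : Char) : PySem.Chars.isupper c = true ↔ 65 ≤ c.toNat ∧ c.toNat ≤ 90 := by
  simp [PySem.Chars.isupper, Char.le_def, UInt32.le_iff_toNat_le, Char.toNat_val]

theorem isspace_lowerChar (x : Char) : PySem.Chars.isspace (PySem.Chars.lowerChar x) = PySem.Chars.isspace x := by
  rw [PySem.Chars.lowerChar]
  split
  · rename_i h
    rw [isupper_iff] at h
    have h2 : (Char.ofNat (x.toNat + 32)).toNat = x.toNat + 32 := toNat_ofNat' _ (by omega)
    rw [PySem.Chars.isspace, PySem.Chars.isspace, h2]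
    apply Bool.eq_iff_iff.mpr
    simp only [Bool.or_eq_true, Bool.and_eq_true, decide_eq_true_eq]
    omega
  · rfl

theorem lowerChar_eq_of_ne (x : Char) (t : Char) (ht : t.toNat < 65) :
    (PySem.Chars.lowerChar x = t) ↔ x = t := by
  rw [PySem.Chars.lowerChar]
  split
  · rename_i h
    rw [isupper_iff] at h
    have h2 : (Char.ofNat (x.toNat + 32)).toNat = x.toNat + 32 := toNat_ofNat' _ (by omega)
    constructor
    · intro he
      exfalso
      have h3 : (Char.ofNat (x.toNat + 32)).toNat = t.toNat := by rw [he]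
      omega
    · intro he
      subst he
      omega
  · simp

theorem isspace_comp_lowerChar : (PySem.Chars.isspace ∘ PySem.Chars.lowerChar) = PySem.Chars.isspace :=
  funext fun y => isspace_lowerChar y

theorem lower_strip (l : List Char) :
    PySem.Chars.lower (PySem.Chars.strip l) = PySem.Chars.strip (PySem.Chars.lower l) := by
  have hls : ∀ m, PySem.Chars.lower (PySem.Chars.lstrip m) = PySem.Chars.lstrip (PySem.Chars.lower m) := by
    intro m
    rw [PySem.Chars.lower, PySem.Chars.lower, PySem.Chars.lstrip, PySem.Chars.lstrip,
      List.dropWhile_map, isspace_comp_lowerChar]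
  have hrs : ∀ m, PySem.Chars.lower (PySem.Chars.rstrip m) = PySem.Chars.rstrip (PySem.Chars.lower m) := by
    intro m
    rw [PySem.Chars.lower, PySem.Chars.lower, PySem.Chars.rstrip, PySem.Chars.rstrip,
      ← List.map_reverse, List.dropWhile_map, isspace_comp_lowerChar, ← List.map_reverse]
  rw [PySem.Chars.strip, PySem.Chars.strip, hrs, hls]

theorem splitP_lower (l : List Char) :
    splitP '\n' (PySem.Chars.lower l)
      = (PySem.Chars.lower (splitP '\n' l).1, (splitP '\n' l).2.map PySem.Chars.lower) := by
  induction l with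
  | nil => simp [splitP, PySem.Chars.lower]
  | cons x xs ih =>
    rw [PySem.Chars.lower] at *
    simp only [List.map_cons]
    rw [splitP, splitP]
    by_cases hx : x = '\n'
    · subst hx
      have h0 : PySem.Chars.lowerChar '\n' = '\n' := by decide
      rw [h0, if_pos rfl, if_pos rfl, ih]
      simp [PySem.Chars.lower]
    · rw [if_neg (by rw [lowerChar_eq_of_ne _ '\n' (by decide)]; exact hx), if_neg hx, ih]
      simp [PySem.Chars.lower]

theorem splitP_sub (l : List Char) :
    splitP '\n' (l.map (fun x => if x = ';' then '\n' else x))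
      = ((splitP ';' (splitP '\n' l).1).1,
         (splitP ';' (splitP '\n' l).1).2
           ++ (splitP '\n' l).2.flatMap (fun p => (splitP ';' p).1 :: (splitP ';' p).2)) := by
  induction l with
  | nil => simp [splitP]
  | cons x xs ih =>
    simp only [List.map_cons]
    by_cases h1 : x = '\n'
    · subst h1
      rw [splitP, splitP]
      simp [splitP, ih]
    · by_cases h2 : x = ';'
      · subst h2
        rw [splitP, splitP]
        simp [splitP, ih]
      · rw [splitP, splitP]
        simp only [if_neg h1, if_neg h2]
        rw [splitP]
        simp [if_neg h2, ih]

theorem rstrip_eq_myR (l : List Char) : PySem.Chars.rstrip l = myR l := by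
  induction l with
  | nil => rfl
  | cons x xs ih =>
    have key : PySem.Chars.rstrip (x :: xs)
        = if (List.dropWhile PySem.Chars.isspace xs.reverse).isEmpty
          then (List.dropWhile PySem.Chars.isspace [x]).reverse
          else x :: PySem.Chars.rstrip xs := by
      rw [PySem.Chars.rstrip, List.reverse_cons, List.dropWhile_append]
      split
      · rfl
      · rw [PySem.Chars.rstrip]; simp
    rw [key]
    by_cases hr : (List.dropWhile PySem.Chars.isspace xs.reverse).isEmpty
    · have h0 : myR xs = [] := by rw [← ih, PySem.Chars.rstrip]; simp_all
      rw [if_pos hr, myR, h0]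
      by_cases hx : PySem.Chars.isspace x <;> simp [List.dropWhile, hx]
    · have h0 : myR xs ≠ [] := by rw [← ih, PySem.Chars.rstrip]; simp_all
      rw [if_neg hr, ih, myR]
      cases hmr : myR xs with
      | nil => exact absurd hmr h0
      | cons a as => rfl

theorem myR_eq_nil_iff (l : List Char) : myR l = [] ↔ ∀ x ∈ l, PySem.Chars.isspace x := by
  induction l with
  | nil => simp [myR]
  | cons x xs ih =>
    cases hr : myR xs with
    | nil =>
      have h1 := ih.mp hr
      rw [myR, hr]
      by_cases hx : PySem.Chars.isspace x
      · simp only [hx]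
        constructor
        · intro _ a ha
          rcases List.mem_cons.mp ha with h | h
          · subst h; exact hx
          · exact h1 a h
        · intro _; rfl
      · simp [hx]
    | cons a as =>
      rw [myR, hr]
      constructor
      · intro h; cases h
      · intro h
        have h2 := ih.mpr (fun y hy => h y (List.mem_cons_of_mem _ hy))
        rw [h2] at hr; cases hr

theorem myR_idem (l : List Char) : myR (myR l) = myR l := by
  induction l with
  | nil => rfl
  | cons x xs ih =>
    rw [myR]
    cases hr : myR xs with
    | nil =>
      by_cases hx : PySem.Chars.isspace x
      · simp [hx, myR]
      · simp [hx, myR]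
    | cons a as =>
      rw [hr] at ih
      rw [myR, ih]

theorem splitP_snd_nil {c : Char} {l : List Char} (h : (splitP c l).2 = []) : (splitP c l).1 = l := by
  induction l with
  | nil => rfl
  | cons x xs ih =>
    rw [splitP] at *
    by_cases hx : x = c
    · rw [if_pos hx] at h; simp at h
    · rw [if_neg hx] at *
      simp at h ⊢
      exact ih h

theorem splitP_allspace {c : Char} (hc : PySem.Chars.isspace c = false) {l : List Char}
    (h : ∀ x ∈ l, PySem.Chars.isspace x) : splitP c l = (l, []) := by
  induction l with
  | nil => rfl
  | cons x xs ih =>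
    rw [splitP]
    have hx : x ≠ c := by
      intro he; subst he
      have := h x (by simp)
      rw [this] at hc; cases hc
    rw [if_neg hx, ih (fun y hy => h y (by simp [hy]))]

theorem splitP_lstrip {c : Char} (hc : PySem.Chars.isspace c = false) (l : List Char) :
    splitP c (PySem.Chars.lstrip l) = (PySem.Chars.lstrip (splitP c l).1, (splitP c l).2) := by
  induction l with
  | nil => rfl
  | cons x xs ih =>
    by_cases hx : PySem.Chars.isspace x
    · have hxc : x ≠ c := fun he => by subst he; rw [hx] at hc; cases hc
      have e1 : PySem.Chars.lstrip (x :: xs) = PySem.Chars.lstrip xs := by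
        rw [PySem.Chars.lstrip, PySem.Chars.lstrip, List.dropWhile_cons_of_pos hx]
      have e2 : PySem.Chars.lstrip (x :: (splitP c xs).1) = PySem.Chars.lstrip (splitP c xs).1 := by
        rw [PySem.Chars.lstrip, PySem.Chars.lstrip, List.dropWhile_cons_of_pos hx]
      rw [e1, ih, splitP, if_neg hxc, e2]
    · have e1 : PySem.Chars.lstrip (x :: xs) = x :: xs := by
        rw [PySem.Chars.lstrip, List.dropWhile_cons_of_neg hx]
      rw [e1, splitP]
      by_cases hxc : x = c
      · simp [hxc, PySem.Chars.lstrip]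
      · simp [hxc, PySem.Chars.lstrip, List.dropWhile_cons_of_neg hx]

theorem splitP_myR {c : Char} (hc : PySem.Chars.isspace c = false) (l : List Char) :
    splitP c (myR l)
      = if (splitP c l).2 = [] then (myR (splitP c l).1, [])
        else ((splitP c l).1, modLast myR (splitP c l).2) := by
  induction l with
  | nil => simp [splitP, myR]
  | cons x xs ih =>
    cases hr : myR xs with
    | nil =>
      have hall : ∀ y ∈ xs, PySem.Chars.isspace y := (myR_eq_nil_iff xs).mp hr
      have hxs : splitP c xs = (xs, []) := splitP_allspace hc hall
      by_cases hx : PySem.Chars.isspace x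
      · have hall2 : ∀ y ∈ x :: xs, PySem.Chars.isspace y := by
          intro y hy
          rcases List.mem_cons.mp hy with h | h
          · subst h; exact hx
          · exact hall y h
        have hm : myR (x :: xs) = [] := by rw [myR, hr, if_pos hx]
        rw [hm, splitP_allspace hc hall2]
        simp [splitP, hm]
      · have hm : myR (x :: xs) = [x] := by rw [myR, hr, if_neg hx]
        rw [hm]
        by_cases hxc : x = c
        · subst hxc
          have h1 : splitP x [x] = ([], [([] : List Char)]) := by simp [splitP]
          have h2 : splitP x (x :: xs) = ([], (splitP x xs).1 :: (splitP x xs).2) := by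
            rw [splitP, if_pos rfl]
          rw [h1, h2, hxs]
          simp [modLast, hr]
        · have h1 : splitP c [x] = ([x], []) := by simp [splitP, hxc]
          have h2 : splitP c (x :: xs) = (x :: (splitP c xs).1, (splitP c xs).2) := by
            rw [splitP, if_neg hxc]
          rw [h1, h2, hxs]
          simp [hm]
    | cons a as =>
      have hne : myR xs ≠ [] := by rw [hr]; simp
      have hm : myR (x :: xs) = x :: myR xs := by
        rw [myR]
        cases hq : myR xs with
        | nil => exact absurd hq hne
        | cons b bs => rfl
      rw [hm]
      by_cases hxc : x = c
      · subst hxc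
        have h1 : splitP x (x :: myR xs) = ([], (splitP x (myR xs)).1 :: (splitP x (myR xs)).2) := by
          rw [splitP, if_pos rfl]
        have h2 : splitP x (x :: xs) = ([], (splitP x xs).1 :: (splitP x xs).2) := by
          rw [splitP, if_pos rfl]
        rw [h1, h2, ih]
        cases ht : (splitP x xs).2 with
        | nil => simp [modLast]
        | cons b r => simp [modLast_cons₂]
      · have h1 : splitP c (x :: myR xs) = (x :: (splitP c (myR xs)).1, (splitP c (myR xs)).2) := by
          rw [splitP, if_neg hxc]
        have h2 : splitP c (x :: xs) = (x :: (splitP c xs).1, (splitP c xs).2) := by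
          rw [splitP, if_neg hxc]
        rw [h1, h2, ih]
        cases ht : (splitP c xs).2 with
        | nil =>
          have hh : (splitP c xs).1 = xs := splitP_snd_nil ht
          simp only [hh]
          simp [hm]
        | cons b r => simp

theorem strip_eq_myR_lstrip (l : List Char) :
    PySem.Chars.strip l = myR (PySem.Chars.lstrip l) := by
  rw [PySem.Chars.strip, rstrip_eq_myR]

theorem lstrip_idem (l : List Char) :
    PySem.Chars.lstrip (PySem.Chars.lstrip l) = PySem.Chars.lstrip l := by
  rw [PySem.Chars.lstrip, PySem.Chars.lstrip]
  induction l with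
  | nil => rfl
  | cons x xs ih =>
    by_cases hx : PySem.Chars.isspace x
    · rw [List.dropWhile_cons_of_pos hx]; exact ih
    · rw [List.dropWhile_cons_of_neg hx, List.dropWhile_cons_of_neg hx]

theorem strip_lstrip (l : List Char) :
    PySem.Chars.strip (PySem.Chars.lstrip l) = PySem.Chars.strip l := by
  rw [strip_eq_myR_lstrip, strip_eq_myR_lstrip, lstrip_idem]

theorem myR_lstrip_myR (l : List Char) :
    myR (PySem.Chars.lstrip (myR l)) = myR (PySem.Chars.lstrip l) := by
  induction l with
  | nil => rfl
  | cons x xs ih =>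
    by_cases hx : PySem.Chars.isspace x
    · have e1 : PySem.Chars.lstrip (x :: xs) = PySem.Chars.lstrip xs := by
        rw [PySem.Chars.lstrip, PySem.Chars.lstrip, List.dropWhile_cons_of_pos hx]
      cases hr : myR xs with
      | nil =>
        have hm : myR (x :: xs) = [] := by rw [myR, hr, if_pos hx]
        rw [hm, e1, ← ih, hr]
      | cons a as =>
        have hm : myR (x :: xs) = x :: myR xs := by
          rw [myR]
          cases hq : myR xs with
          | nil => rw [hq] at hr; cases hr
          | cons b bs => rfl
        have e2 : PySem.Chars.lstrip (x :: myR xs) = PySem.Chars.lstrip (myR xs) := by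
          rw [PySem.Chars.lstrip, PySem.Chars.lstrip, List.dropWhile_cons_of_pos hx]
        rw [hm, e2, e1, ih]
    · have e1 : PySem.Chars.lstrip (x :: xs) = x :: xs := by
        rw [PySem.Chars.lstrip, List.dropWhile_cons_of_neg hx]
      cases hr : myR xs with
      | nil =>
        have hm : myR (x :: xs) = [x] := by rw [myR, hr, if_neg hx]
        have e2 : PySem.Chars.lstrip [x] = [x] := by
          rw [PySem.Chars.lstrip, List.dropWhile_cons_of_neg hx]
        have e3 : myR [x] = [x] := by simp [myR, hx]
        rw [hm, e2, e1, e3, hm]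
      | cons a as =>
        have hm : myR (x :: xs) = x :: myR xs := by
          rw [myR]
          cases hq : myR xs with
          | nil => rw [hq] at hr; cases hr
          | cons b bs => rfl
        have e2 : PySem.Chars.lstrip (x :: myR xs) = x :: myR xs := by
          rw [PySem.Chars.lstrip, List.dropWhile_cons_of_neg hx]
        rw [hm, e2, e1]
        -- goal: myR (x :: myR xs) = myR (x :: xs)
        have h3 : myR (myR xs) = myR xs := myR_idem xs
        rw [myR, myR, h3, hr]

theorem strip_myR (l : List Char) :
    PySem.Chars.strip (myR l) = PySem.Chars.strip l := by
  rw [strip_eq_myR_lstrip, strip_eq_myR_lstrip, myR_lstrip_myR]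

theorem strip_idem (l : List Char) :
    PySem.Chars.strip (PySem.Chars.strip l) = PySem.Chars.strip l := by
  calc PySem.Chars.strip (PySem.Chars.strip l)
      = PySem.Chars.strip (myR (PySem.Chars.lstrip l)) := by rw [← strip_eq_myR_lstrip]
    _ = PySem.Chars.strip (PySem.Chars.lstrip l) := strip_myR _
    _ = PySem.Chars.strip l := strip_lstrip _

theorem map_strip_modLast (t : List (List Char)) :
    (modLast myR t).map PySem.Chars.strip = t.map PySem.Chars.strip := by
  induction t with
  | nil => rfl
  | cons a rest ih =>
    cases rest with
    | nil => simp [modLast, strip_myR]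
    | cons b r =>
      rw [modLast_cons₂]
      simp only [List.map_cons] at *
      rw [ih]

theorem map_strip_splitP_strip {c : Char} (hc : PySem.Chars.isspace c = false) (m : List Char) :
    ((splitP c (PySem.Chars.strip m)).1 :: (splitP c (PySem.Chars.strip m)).2).map PySem.Chars.strip
      = ((splitP c m).1 :: (splitP c m).2).map PySem.Chars.strip := by
  rw [strip_eq_myR_lstrip m, splitP_myR hc (PySem.Chars.lstrip m), splitP_lstrip hc m]
  cases ht : (splitP c m).2 with
  | nil => simp [← strip_eq_myR_lstrip, strip_idem]
  | cons b r => simp [strip_lstrip, map_strip_modLast]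

-- the per-line fact: stripping the line first does not change the stripped tokens
theorem per_line (line : List Char) :
    ((splitP ';' (PySem.Chars.lower (PySem.Chars.strip line))).1
        :: (splitP ';' (PySem.Chars.lower (PySem.Chars.strip line))).2).map
      (fun z => String.ofList (PySem.Chars.strip z))
      = ((splitP ';' (PySem.Chars.lower line)).1
          :: (splitP ';' (PySem.Chars.lower line)).2).map
        (fun z => String.ofList (PySem.Chars.strip z)) := by
  rw [lower_strip]
  have h1 := map_strip_splitP_strip (c := ';') (by decide) (PySem.Chars.lower line)
  have h2 := congrArg (List.map String.ofList) h1
  simpa [List.map_map, Function.comp_def] using h2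

-- ===== VERDICT (by name: the statement is the Claim_ definition above) =====
theorem first_clean_spec : Claim_equal_first_clean := by
  unfold Claim_equal_first_clean
  intro input _
  unfold Spec_first_clean first_clean first_clean_alt
  rw [PySem.List.foldl_append_eq_flatMap, List.nil_append, replace_single,
    splitOn_single, splitOn_single]
  simp only [splitOn_single]
  rw [splitP_sub (PySem.Chars.lower input.toList), splitP_lower]
  simp only [List.map_cons, List.map_append, List.flatMap_cons, List.map_flatMap,
    List.flatMap_map]
  have hfun : (fun line => String.ofList (PySem.Chars.strip (splitP ';' (PySem.Chars.lower (PySem.Chars.strip line))).1)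
        :: List.map (fun z => String.ofList (PySem.Chars.strip z)) (splitP ';' (PySem.Chars.lower (PySem.Chars.strip line))).2)
      = (fun line => String.ofList (PySem.Chars.strip (splitP ';' (PySem.Chars.lower line)).1)
        :: List.map (fun z => String.ofList (PySem.Chars.strip z)) (splitP ';' (PySem.Chars.lower line)).2) :=
    funext fun line => by simpa using per_line line
  have hh := per_line (splitP '\n' input.toList).1
  simp only [List.map_cons] at hh
  injection hh with h1 h2
  rw [List.cons_append, h1, h2, hfun]
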